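-- pv_equiv track=rewrite | github.com/zyond26/Practise_ICPC | North-icpc/G.py | solve
-- ===== SOURCE A (Python) =====
-- def is_nice_string(s):
--     n = len(s)
--     if '1' not in s:
--         return False
--
--     for i in range(n):
--         if s[i] == '1':
--             left_zeros = 0
--             j = i - 1
--             while j >= 0 and s[j] == '0':
--                 left_zeros += 1
--                 j -= 1
--
--             right_zeros = 0
--             j = i + 1
--             while j < n and s[j] == '0':
--                 right_zeros += 1
--                 j += 1
--
--             if left_zeros != right_zeros:
--                 return False
--
--     return True
--
-- def solve(n, s):
--     max_len = 0
--
--     for mask in range(1 << n):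
--         curr = ""
--         for i in range(n):
--             if mask & (1 << i):
--                 curr += s[i]
--
--         if len(curr) > 0 and '1' in curr and is_nice_string(curr):
--             max_len = max(max_len, len(curr))
--
--     return max_len
-- ===== SOURCE B (Python) =====
-- def solve(n, s):
--     # generate all subsequences of s[:n] by list doubling (index m = bitmask m),
--     # then score each with a linear-time niceness check
--     subs = [""]
--     for i in range(n):
--         ch = s[i]
--         subs += [t + ch for t in subs]
--     best = 0
--     for t in subs:
--         if '1' in t and _nice(t):
--             best = max(best, len(t))
--     return best
--
-- def _nice(t):
--     # one backward pass for zero-runs starting at each position,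
--     # one forward pass carrying the zero-run ending just before each position
--     m = len(t)
--     right = [0] * (m + 1)
--     for j in range(m - 1, -1, -1):
--         right[j] = right[j + 1] + 1 if t[j] == '0' else 0
--     run = 0
--     for i in range(m):
--         c = t[i]
--         if c == '1':
--             if run != right[i + 1]:
--                 return False
--             run = 0
--         elif c == '0':
--             run += 1
--         else:
--             run = 0
--     return True
-- ===== Notes on version B (the rewrite author's own statement) =====
-- stated objective: alternative
-- what changed: B replaces A's per-'1' while-loop rescans inside the niceness check with two linear run-length passes (a backward right-run array and a forward running counter), and builds the subsequence list once by doubling instead of decoding every bitmask bit by bit.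
import Mathlib
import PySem

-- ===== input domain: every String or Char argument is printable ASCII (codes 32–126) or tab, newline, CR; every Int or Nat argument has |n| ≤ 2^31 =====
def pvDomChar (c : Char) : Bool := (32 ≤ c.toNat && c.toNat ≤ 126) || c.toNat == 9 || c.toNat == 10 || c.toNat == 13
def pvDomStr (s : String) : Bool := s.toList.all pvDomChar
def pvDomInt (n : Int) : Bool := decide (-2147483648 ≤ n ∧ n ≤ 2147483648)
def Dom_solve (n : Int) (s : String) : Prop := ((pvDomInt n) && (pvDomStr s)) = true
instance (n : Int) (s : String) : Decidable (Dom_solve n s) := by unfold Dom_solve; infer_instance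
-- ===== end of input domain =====

-- B replaces A's per-'1' while-loop rescans with two linear run-length passes and
-- builds the subsequence list by doubling instead of decoding each bitmask (objective: alternative).

-- ===== PORT A =====
-- A's inner while-loop 'j = i-1; while j >= 0 and s[j] == "0"': count of '0's going down from index k-1
def leftZeros (cs : List Char) : Nat → Nat
  | 0 => 0
  | k + 1 => if cs.getD k ' ' = '0' then leftZeros cs k + 1 else 0

-- A's inner while-loop 'j = i+1; while j < n and s[j] == "0"' (in-range guard only makes it total)
def rightZeros (cs : List Char) (j : Nat) : Nat :=
  if _h : j < cs.length then
    if cs.getD j ' ' = '0' then rightZeros cs (j + 1) + 1 else 0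
  else 0
termination_by cs.length - j

-- the body of A's 'for i in range(n)' loop in is_nice_string
def chk (cs : List Char) (i : Nat) : Bool :=
  if cs.getD i ' ' = '1' then leftZeros cs i == rightZeros cs (i + 1) else true

def isNice (cs : List Char) : Bool :=
  cs.contains '1' && (List.range cs.length).all (chk cs)

-- A's 'curr' construction: for i in range(n): if mask & (1 << i): curr += s[i]
def buildCurr (cs : List Char) (N : Nat) (mask : Nat) : List Char :=
  (List.range N).foldl (fun acc i => if mask.testBit i then acc ++ [cs.getD i ' '] else acc) []

def solve (n : Int) (s : String) : Int :=
  let cs := s.toList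
  let N := n.toNat
  (List.range (2 ^ N)).foldl (fun maxLen mask =>
    let curr := buildCurr cs N mask
    if decide (0 < curr.length) && curr.contains '1' && isNice curr then
      max maxLen (curr.length : Int)
    else maxLen) 0

-- ===== PORT B =====
-- Source B's backward pass: right[j] = right[j+1]+1 if t[j]=='0' else 0 (right[m] = 0)
def rightRuns : List Char → List Nat
  | [] => [0]
  | c :: t => (if c = '0' then (rightRuns t).headD 0 + 1 else 0) :: rightRuns t

-- Source B's forward pass carrying 'run'; rr is the remaining part of the right[] array
def niceGo : List Char → List Nat → Nat → Bool
  | [], _, _ => true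
  | c :: t, rr, run =>
    if c = '1' then (run == rr.headD 0) && niceGo t rr.tail 0
    else if c = '0' then niceGo t rr.tail (run + 1)
    else niceGo t rr.tail 0

def niceFast (cs : List Char) : Bool := niceGo cs (rightRuns cs).tail 0

-- Source B's 'subs += [t + ch for t in subs]' doubling loop
def subsList (l : List Char) : List (List Char) :=
  l.foldl (fun acc c => acc ++ acc.map (· ++ [c])) [[]]

def solve_alt (n : Int) (s : String) : Int :=
  let l := s.toList.take n.toNat
  (subsList l).foldl (fun best t =>
    if t.contains '1' && niceFast t then max best (t.length : Int) else best) 0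

-- ===== PRECONDITION & SPEC =====
-- A raises (ValueError on '1 << n' for n < 0, IndexError on 's[i]' for n > len(s)) outside this
def Pre_solve (n : Int) (s : String) : Prop := 0 ≤ n ∧ n ≤ (s.toList.length : Int)
instance (n : Int) (s : String) : Decidable (Pre_solve n s) := by unfold Pre_solve; infer_instance
def pvWitness_solve : Int × String := (2, "01")

def Spec_solve (n : Int) (s : String) (out : Int) : Prop := out = solve_alt n s
instance (n : Int) (s : String) (out : Int) : Decidable (Spec_solve n s out) := by unfold Spec_solve; infer_instance

-- ===== CLAIM (what is proved, stated in full; the proofs are below) =====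
def Claim_equal_solve : Prop := ∀ (n : Int) (s : String), Dom_solve n s → Pre_solve n s → Spec_solve n s (solve n s)

-- ===== LEMMAS AND PROOFS =====

def lz : List Char → Nat
  | [] => 0
  | c :: t => if c = '0' then lz t + 1 else 0

theorem getD_rev_append (rp : List Char) (c : Char) (t : List Char) :
    (rp.reverse ++ c :: t).getD rp.length ' ' = c := by
  simp [List.getD]

theorem leftZeros_prefix (rp : List Char) : ∀ t, leftZeros (rp.reverse ++ t) rp.length = lz rp := by
  induction rp with
  | nil => intro t; rfl
  | cons c rp ih =>
    intro t
    have : (c :: rp).reverse ++ t = rp.reverse ++ (c :: t) := by simp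
    rw [this]
    show leftZeros (rp.reverse ++ c :: t) (rp.length + 1) = _
    rw [leftZeros, getD_rev_append, ih (c :: t), lz]

theorem rightZeros_cons (c : Char) (t : List Char) : ∀ j, rightZeros (c :: t) (j + 1) = rightZeros t j := by
  have H : ∀ fuel j, t.length - j ≤ fuel → rightZeros (c :: t) (j + 1) = rightZeros t j := by
    intro fuel
    induction fuel with
    | zero =>
      intro j hj
      have hge : ¬ j < t.length := by omega
      rw [rightZeros]
      conv_rhs => rw [rightZeros]
      simp [hge]
    | succ f ihf =>
      intro j hj
      rw [rightZeros]
      conv_rhs => rw [rightZeros]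
      by_cases hlt : j < t.length
      · have h1 : j + 1 < (c :: t).length := by simp; omega
        have hg : (c :: t).getD (j + 1) ' ' = t.getD j ' ' := by simp [List.getD]
        simp only [h1, dif_pos, hlt, hg]
        rw [ihf (j+1) (by omega)]
      · simp [hlt]
  intro j; exact H (t.length - j) j le_rfl

theorem rightZeros_eq_lz_drop (cs : List Char) : ∀ j, rightZeros cs j = lz (cs.drop j) := by
  induction cs with
  | nil => intro j; rw [rightZeros]; simp [lz]
  | cons c t ih =>
    intro j
    cases j with
    | zero =>
      rw [rightZeros]
      simp only [List.length_cons, Nat.zero_lt_succ, dif_pos, List.drop_zero]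
      rw [rightZeros_cons, ih 0]
      simp [lz, List.getD]
    | succ k =>
      rw [rightZeros_cons, ih k]
      rfl

def okFrom : List Char → Nat → Bool
  | [], _ => true
  | c :: t, run =>
    if c = '1' then (run == lz t) && okFrom t 0
    else if c = '0' then okFrom t (run + 1)
    else okFrom t 0

theorem drop_rev_append (rp : List Char) (c : Char) (t : List Char) :
    (rp.reverse ++ c :: t).drop (rp.length + 1) = t := by
  rw [show rp.length + 1 = rp.reverse.length + 1 by simp]
  rw [show rp.reverse.length + 1 = rp.reverse.length + (1:Nat) from rfl]
  simp [List.drop_append]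

theorem allChk_master (t : List Char) : ∀ rp : List Char,
    (List.range t.length).all (fun i => chk (rp.reverse ++ t) (rp.length + i)) = okFrom t (lz rp) := by
  induction t with
  | nil => intro rp; rfl
  | cons c u ih =>
    intro rp
    have eapp : rp.reverse ++ c :: u = (c :: rp).reverse ++ u := by simp
    have e0 : chk (rp.reverse ++ c :: u) (rp.length + 0) = (if c = '1' then lz rp == lz u else true) := by
      rw [Nat.add_zero, chk, getD_rev_append, leftZeros_prefix, rightZeros_eq_lz_drop, drop_rev_append]
    rw [List.length_cons, List.range_succ_eq_map, List.all_cons, List.all_map, e0]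
    have hfun : ((fun i => chk (rp.reverse ++ c :: u) (rp.length + i)) ∘ Nat.succ)
        = (fun i => chk ((c :: rp).reverse ++ u) ((c :: rp).length + i)) := by
      funext i
      rw [Function.comp_apply, eapp]
      congr 1
      simp [Nat.succ_eq_add_one]
      omega
    rw [hfun, ih (c :: rp)]
    by_cases h1 : c = '1'
    · simp [okFrom, h1, lz]
    · by_cases h0 : c = '0'
      · simp [okFrom, h0, lz]
      · simp [okFrom, h1, h0, lz]

theorem buildCurr_succ (cs : List Char) (N m : Nat) :
    buildCurr cs (N + 1) m = buildCurr cs N m ++ (if m.testBit N then [cs.getD N ' '] else []) := by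
  rw [buildCurr, buildCurr, List.range_succ, List.foldl_append]
  simp only [List.foldl_cons, List.foldl_nil]
  split <;> simp

theorem buildCurr_congr (N : Nat) : ∀ (m : Nat) (l₁ l₂ : List Char),
    (∀ i < N, l₁.getD i ' ' = l₂.getD i ' ') → buildCurr l₁ N m = buildCurr l₂ N m := by
  induction N with
  | zero => intro m l₁ l₂ _; rfl
  | succ k ih =>
    intro m l₁ l₂ h
    rw [buildCurr_succ, buildCurr_succ, ih m l₁ l₂ (fun i hi => h i (by omega)), h k (by omega)]

theorem buildCurr_bits (l : List Char) : ∀ (N m₁ m₂ : Nat),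
    (∀ i < N, m₁.testBit i = m₂.testBit i) → buildCurr l N m₁ = buildCurr l N m₂ := by
  intro N
  induction N with
  | zero => intro m₁ m₂ _; rfl
  | succ k ih =>
    intro m₁ m₂ h
    rw [buildCurr_succ, buildCurr_succ, ih m₁ m₂ (fun i hi => h i (by omega)), h k (by omega)]

theorem subsList_eq (l : List Char) :
    subsList l = (List.range (2 ^ l.length)).map (buildCurr l l.length) := by
  induction l using List.reverseRecOn with
  | nil => rfl
  | append_singleton l c ih =>
    have hstep : subsList (l ++ [c]) = subsList l ++ (subsList l).map (· ++ [c]) := by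
      rw [subsList, subsList, List.foldl_append]
      rfl
    have hlen : (l ++ [c]).length = l.length + 1 := by simp
    rw [hstep, ih, hlen, pow_succ, mul_two, List.range_add, List.map_append, List.map_map, List.map_map]
    congr 1
    · apply List.map_congr_left
      intro m hm
      rw [List.mem_range] at hm
      rw [buildCurr_succ]
      rw [Nat.testBit_lt_two_pow hm]
      simp only [if_neg Bool.false_ne_true, List.append_nil]
      apply buildCurr_congr
      intro i hi
      rw [List.getD_append]
      omega
    · apply List.map_congr_left
      intro m hm
      rw [List.mem_range] at hm
      rw [Function.comp_apply, Function.comp_apply, buildCurr_succ]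
      have hbit : (2 ^ l.length + m).testBit l.length = true := by
        rw [Nat.testBit_two_pow_add_eq, Nat.testBit_lt_two_pow hm]; rfl
      have hget : (l ++ [c]).getD l.length ' ' = c := by
        simp [List.getD]
      rw [hbit, hget, if_pos rfl]
      congr 1
      rw [buildCurr_bits (l ++ [c]) l.length (2 ^ l.length + m) m
          (fun i hi => Nat.testBit_two_pow_add_gt hi m)]
      apply buildCurr_congr
      intro i hi
      rw [List.getD_append]
      omega

theorem rightRuns_headD (t : List Char) : (rightRuns t).headD 0 = lz t := by
  induction t with
  | nil => rfl
  | cons c t ih =>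
    rw [lz, rightRuns, List.headD_cons, ← ih]

theorem niceGo_eq_okFrom (t : List Char) : ∀ run, niceGo t (rightRuns t).tail run = okFrom t run := by
  induction t with
  | nil => intro run; rfl
  | cons c t ih =>
    intro run
    show niceGo (c :: t) (rightRuns t) run = _
    simp only [niceGo, okFrom, rightRuns_headD, ih]

theorem niceFast_eq_okFrom (t : List Char) : niceFast t = okFrom t 0 :=
  niceGo_eq_okFrom t 0

theorem allChk_eq (cs : List Char) : (List.range cs.length).all (chk cs) = okFrom cs 0 := by
  simpa using allChk_master cs []

theorem cond_eq (t : List Char) :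
    (decide (0 < t.length) && t.contains '1' && isNice t) = (t.contains '1' && niceFast t) := by
  by_cases hc : t.contains '1' = true
  · have hne : t ≠ [] := by intro h; subst h; simp at hc
    have hlen : decide (0 < t.length) = true := by
      cases t with
      | nil => exact absurd rfl hne
      | cons a u => simp
    rw [isNice, allChk_eq, niceFast_eq_okFrom, hlen, hc]
    simp
  · rw [Bool.not_eq_true] at hc
    rw [isNice, hc]
    simp

theorem getD_take (cs : List Char) (N i : Nat) (hi : i < N) :
    (cs.take N).getD i ' ' = cs.getD i ' ' := by
  simp [List.getD, hi]

-- ===== VERDICT (by name: the statement is the Claim_ definition above) =====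
theorem solve_spec : Claim_equal_solve := by
  intro n s _dom hpre
  obtain ⟨h0, hle⟩ := hpre
  show solve n s = solve_alt n s
  rw [solve, solve_alt]
  have hN : n.toNat ≤ s.toList.length := Int.toNat_le.mpr hle
  have hlenl : (s.toList.take n.toNat).length = n.toNat := by
    rw [List.length_take]; omega
  have hbc : ∀ m : Nat, buildCurr s.toList n.toNat m = buildCurr (s.toList.take n.toNat) n.toNat m := by
    intro m
    exact buildCurr_congr n.toNat m _ _ (fun i hi => (getD_take s.toList n.toNat i hi).symm)
  calc (List.range (2 ^ n.toNat)).foldl (fun maxLen mask =>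
          let curr := buildCurr s.toList n.toNat mask
          if decide (0 < curr.length) && curr.contains '1' && isNice curr then
            max maxLen (curr.length : Int)
          else maxLen) 0
      = (List.range (2 ^ (s.toList.take n.toNat).length)).foldl (fun maxLen mask =>
          let curr := buildCurr (s.toList.take n.toNat) (s.toList.take n.toNat).length mask
          if decide (0 < curr.length) && curr.contains '1' && isNice curr then
            max maxLen (curr.length : Int)
          else maxLen) 0 := by
        rw [hlenl]
        congr 1
        funext a b
        rw [hbc b]
    _ = ((List.range (2 ^ (s.toList.take n.toNat).length)).map
          (buildCurr (s.toList.take n.toNat) (s.toList.take n.toNat).length)).foldl (fun maxLen curr =>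
          if decide (0 < curr.length) && curr.contains '1' && isNice curr then
            max maxLen (curr.length : Int)
          else maxLen) 0 := by
        rw [List.foldl_map]
    _ = (subsList (s.toList.take n.toNat)).foldl (fun maxLen curr =>
          if decide (0 < curr.length) && curr.contains '1' && isNice curr then
            max maxLen (curr.length : Int)
          else maxLen) 0 := by
        rw [subsList_eq]
    _ = (subsList (s.toList.take n.toNat)).foldl (fun best t =>
          if t.contains '1' && niceFast t then max best (t.length : Int) else best) 0 := by
        congr 1
        funext a t
        rw [cond_eq]
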